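-- pv_equiv track=rewrite | github.com/susu12138/networkxx | time_r.py | changeToStr
-- ===== SOURCE A (Python) =====
-- def changeToStr(num):
--     strl=""
--     a = ord('a')
--     num=int(num)
--     while(num):
--         temp=(num % 100)+a
--         strl+=chr(temp)
--         num=(int)(num/100)
--     return strl[::-1]
-- ===== SOURCE B (Python) =====
-- def changeToStr(num):
--     num = int(num)
--
--     def digits(n):
--         # base-100 digit values, most-significant first; same arithmetic as A:
--         # n % 100 and truncating division int(n/100)
--         return [] if not n else digits(int(n / 100)) + [n % 100]
--
--     return ''.join(chr(d + ord('a')) for d in digits(num))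
-- ===== Notes on version B (the rewrite author's own statement) =====
-- stated objective: alternative
-- what changed: Instead of A's while-loop that accumulates characters least-significant-first into a string and reverses it at the end, B recursively builds the list of base-100 digit values most-significant-first and then maps/joins them to characters in one separate pass.
import Mathlib
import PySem

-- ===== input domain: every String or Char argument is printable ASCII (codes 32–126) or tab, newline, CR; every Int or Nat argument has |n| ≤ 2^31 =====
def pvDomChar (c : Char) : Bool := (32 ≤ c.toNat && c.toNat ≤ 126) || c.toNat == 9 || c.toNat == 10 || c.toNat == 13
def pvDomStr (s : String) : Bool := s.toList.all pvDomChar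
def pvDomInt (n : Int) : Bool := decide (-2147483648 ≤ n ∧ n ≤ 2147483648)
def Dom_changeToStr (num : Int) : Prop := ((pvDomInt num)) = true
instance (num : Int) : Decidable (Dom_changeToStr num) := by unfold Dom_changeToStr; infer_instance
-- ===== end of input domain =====

-- B recursively collects the base-100 digit values most-significant-first and maps them
-- to characters in a separate join pass, replacing A's LSB-first char accumulation and
-- final reversal (objective: alternative decomposition).

-- termination measure shared by both ports: int(n/100) shrinks |n|
theorem pvTdiv100_lt (n : Int) (h : n ≠ 0) : (n.tdiv 100).natAbs < n.natAbs := by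
  have h100 : (n.tdiv 100).natAbs = n.natAbs / 100 := Int.natAbs_tdiv n 100
  rw [h100]
  exact Nat.div_lt_self (Int.natAbs_pos.mpr h) (by norm_num)

-- ===== PORT A =====
-- num % 100 (Python, positive divisor) = Lean's Int %; int(num/100) truncates toward
-- zero = Int.tdiv (exact on |num| ≤ 2^31, where the float division cannot mis-truncate).
-- chr(temp): temp is in 97..196, Char.ofNat is exact there.
def changeToStrLoop (num : Int) (strl : List Char) : List Char :=
  if h : num = 0 then strl
  else
    let temp : Int := num % 100 + 97
    changeToStrLoop (num.tdiv 100) (strl ++ [Char.ofNat temp.toNat])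
termination_by num.natAbs
decreasing_by exact pvTdiv100_lt num h

-- strl[::-1] is List.reverse
def changeToStr (num : Int) : String :=
  String.ofList (changeToStrLoop num []).reverse

-- ===== PORT B =====
-- digits(n): MSB-first base-100 digit values
def pvDigitsB (n : Int) : List Int :=
  if h : n = 0 then []
  else pvDigitsB (n.tdiv 100) ++ [n % 100]
termination_by n.natAbs
decreasing_by exact pvTdiv100_lt n h

-- ''.join(chr(d + ord('a')) for d in digits(num))
def changeToStr_alt (num : Int) : String :=
  String.ofList ((pvDigitsB num).map (fun d => Char.ofNat (d + 97).toNat))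

-- ===== PRECONDITION & SPEC =====
def Spec_changeToStr (num : Int) (out : String) : Prop := out = changeToStr_alt num
instance (num : Int) (out : String) : Decidable (Spec_changeToStr num out) := by unfold Spec_changeToStr; infer_instance

-- ===== CLAIM (what is proved, stated in full; the proofs are below) =====
def Claim_equal_changeToStr : Prop := ∀ (num : Int), Dom_changeToStr num → Spec_changeToStr num (changeToStr num)

-- ===== LEMMAS AND PROOFS =====

-- A's loop result is the accumulator followed by B's MSB-first digits, mapped to chars and reversed.
theorem changeToStrLoop_eq (num : Int) :
    ∀ strl, changeToStrLoop num strl =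
      strl ++ ((pvDigitsB num).map (fun d => Char.ofNat (d + 97).toNat)).reverse := by
  induction num using pvDigitsB.induct with
  | case1 =>
      intro strl
      rw [changeToStrLoop, pvDigitsB]
      simp
  | case2 num h ih =>
      intro strl
      rw [changeToStrLoop, pvDigitsB]
      simp only [h, dite_false, ih]
      simp

-- ===== VERDICT (by name: the statement is the Claim_ definition above) =====
theorem changeToStr_spec : Claim_equal_changeToStr := by
  intro num _
  unfold Spec_changeToStr changeToStr changeToStr_alt
  rw [changeToStrLoop_eq]
  simp
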